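-- pv_equiv track=rewrite | github.com/sidocoder/DSA | codeforce.py | max_area_of_ones
-- ===== SOURCE A (Python) =====
-- def max_area_of_ones(s):
--     n = len(s)
--     doubled_s = s + s
--     max_1_seq = 0
--     current_seq = 0
--
--     for char in doubled_s:
--         if char == '1':
--             current_seq += 1
--             max_1_seq = max(max_1_seq, current_seq)
--         else:
--             current_seq = 0
--
--     if max_1_seq == 0:
--         return 0
--     if max_1_seq >= n:
--         return n * n
--
--     return ((max_1_seq + 1) // 2) * n
-- ===== SOURCE B (Python) =====
-- def max_area_of_ones(s):
--     n = len(s)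
--     best = 0          # longest run of '1's inside s
--     cur = 0           # current run; after the loop = trailing run length
--     zero_seen = False
--     for ch in s:
--         if ch == '1':
--             cur += 1
--             if cur > best:
--                 best = cur
--         else:
--             zero_seen = True
--             cur = 0
--     if not zero_seen:
--         # all-ones (or empty) string: circular run covers everything
--         return n * n
--     prefix = 0
--     for ch in s:
--         if ch != '1':
--             break
--         prefix += 1
--     m = max(best, prefix + cur)   # best circular run; m < n since a '0' exists
--     if m == 0:
--         return 0
--     return ((m + 1) // 2) * n
-- ===== Notes on version B (the rewrite author's own statement) =====
-- stated objective: simpler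
-- what changed: B drops the doubled string s+s: one pass over s finds the internal max run, trailing run and a zero-seen flag, a short second pass the leading run; the circular max is max(internal, prefix+suffix), with the all-ones case returning n*n directly.
import Mathlib
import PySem

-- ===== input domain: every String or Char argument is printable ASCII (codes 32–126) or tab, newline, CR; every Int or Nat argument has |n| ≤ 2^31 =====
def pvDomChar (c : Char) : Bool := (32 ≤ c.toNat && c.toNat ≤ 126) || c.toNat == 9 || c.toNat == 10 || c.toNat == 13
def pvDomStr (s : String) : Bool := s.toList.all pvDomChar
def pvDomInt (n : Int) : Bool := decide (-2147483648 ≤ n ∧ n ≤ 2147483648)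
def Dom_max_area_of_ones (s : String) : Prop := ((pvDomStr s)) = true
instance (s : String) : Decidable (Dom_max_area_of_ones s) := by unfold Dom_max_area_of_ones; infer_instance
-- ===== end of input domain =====

-- B avoids building the doubled string: one pass for the internal max run plus
-- prefix/suffix run lengths, special-casing the all-ones string (objective: simpler).

-- ===== PORT A =====
def maStep (st : Int × Int) (c : Char) : Int × Int :=
  if c = '1' then (max st.1 (st.2 + 1), st.2 + 1) else (st.1, 0)

def max_area_of_ones (s : String) : Int :=
  let n : Int := (s.toList.length : Int)
  let doubled := s.toList ++ s.toList
  let r := doubled.foldl maStep (0, 0)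
  if r.1 = 0 then 0
  else if r.1 ≥ n then n * n
  else PySem.Int.floordiv (r.1 + 1) 2 * n

-- ===== PORT B =====
def mbStep (st : Int × Int × Bool) (c : Char) : Int × Int × Bool :=
  if c = '1' then
    ((if st.2.1 + 1 > st.1 then st.2.1 + 1 else st.1), st.2.1 + 1, st.2.2)
  else (st.1, 0, true)

-- the second loop of B: leading-'1' prefix length (break at first non-'1')
def mbPrefix : List Char → Int
  | [] => 0
  | c :: t => if c = '1' then 1 + mbPrefix t else 0

def max_area_of_ones_alt (s : String) : Int :=
  let n : Int := (s.toList.length : Int)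
  let st := s.toList.foldl mbStep (0, 0, false)
  if st.2.2 = false then n * n
  else
    let m := max st.1 (mbPrefix s.toList + st.2.1)
    if m = 0 then 0
    else PySem.Int.floordiv (m + 1) 2 * n

-- ===== PRECONDITION & SPEC =====
def Spec_max_area_of_ones (s : String) (out : Int) : Prop := out = max_area_of_ones_alt s
instance (s : String) (out : Int) : Decidable (Spec_max_area_of_ones s out) := by unfold Spec_max_area_of_ones; infer_instance

-- ===== CLAIM (what is proved, stated in full; the proofs are below) =====
def Claim_equal_max_area_of_ones : Prop := ∀ (s : String), Dom_max_area_of_ones s → Spec_max_area_of_ones s (max_area_of_ones s)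

-- ===== LEMMAS AND PROOFS =====

lemma mbPrefix_bounds (l : List Char) : 0 ≤ mbPrefix l ∧ mbPrefix l ≤ l.length := by
  induction l with
  | nil => simp [mbPrefix]
  | cons c t ih =>
    obtain ⟨ih1, ih2⟩ := ih
    simp only [mbPrefix, List.length_cons]
    split_ifs
    · constructor
      · omega
      · push_cast; omega
    · constructor
      · omega
      · push_cast; omega

-- invariants of A's fold: 0 ≤ cur ≤ best, best only grows
lemma maFold_bounds (l : List Char) (m c : Int) (h0 : 0 ≤ c) (h1 : c ≤ m) :
    0 ≤ (List.foldl maStep (m, c) l).2 ∧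
    (List.foldl maStep (m, c) l).2 ≤ (List.foldl maStep (m, c) l).1 ∧
    m ≤ (List.foldl maStep (m, c) l).1 := by
  induction l generalizing m c with
  | nil => simp only [List.foldl_nil]; exact ⟨h0, h1, le_rfl⟩
  | cons x t ih =>
    simp only [List.foldl_cons, maStep]
    split_ifs
    · have := ih (max m (c + 1)) (c + 1) (by omega) (by omega)
      exact ⟨this.1, this.2.1, le_trans (le_max_left _ _) this.2.2⟩
    · exact ih m 0 le_rfl (by omega)

-- coarse upper bounds on both components
lemma maFold_le (l : List Char) (m c : Int) (h0 : 0 ≤ c) :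
    (List.foldl maStep (m, c) l).1 ≤ max m (c + l.length) ∧
    (List.foldl maStep (m, c) l).2 ≤ c + l.length := by
  induction l generalizing m c with
  | nil => simp
  | cons x t ih =>
    simp only [List.foldl_cons, maStep, List.length_cons]
    split_ifs
    · have := ih (max m (c + 1)) (c + 1) (by omega)
      push_cast
      push_cast at this
      omega
    · have := ih m 0 le_rfl
      push_cast
      push_cast at this
      omega

-- the fold's best from any admissible state, in terms of prefix and the zero-state best
lemma maFold_fst_eq (l : List Char) (m c : Int) (h0 : 0 ≤ c) (h1 : c ≤ m) :
    (List.foldl maStep (m, c) l).1 =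
      max m (max (c + mbPrefix l) ((List.foldl maStep (0, 0) l).1)) := by
  induction l generalizing m c with
  | nil => simp [mbPrefix]; omega
  | cons x t ih =>
    simp only [List.foldl_cons, maStep, mbPrefix]
    split_ifs
    · rw [ih (max m (c + 1)) (c + 1) (by omega) (by omega),
        ih (max 0 (0 + 1)) (0 + 1) (by omega) (by omega)]
      have hp := mbPrefix_bounds t
      omega
    · rw [ih m 0 le_rfl (le_trans h0 h1), ih 0 0 le_rfl le_rfl]
      have hp := mbPrefix_bounds t
      omega

-- all-ones list: the fold is fully determined
lemma maFold_all_ones (l : List Char) (h : ∀ x ∈ l, x = '1') (m c : Int)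
    (h0 : 0 ≤ c) (h1 : c ≤ m) :
    List.foldl maStep (m, c) l = (max m (c + l.length), c + l.length) := by
  induction l generalizing m c with
  | nil => simp; omega
  | cons x t ih =>
    have hx : x = '1' := h x (List.mem_cons_self ..)
    simp only [List.foldl_cons, maStep, List.length_cons]
    rw [if_pos hx, ih (fun y hy => h y (List.mem_cons_of_mem _ hy)) (max m (c + 1)) (c + 1)
      (by omega) (by omega), Prod.mk.injEq]
    constructor <;> (push_cast; omega)

-- a non-'1' somewhere: the best run is strictly shorter than c + length
lemma maFold_fst_lt (l : List Char) (m c : Int) (h0 : 0 ≤ c)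
    (h : ∃ x ∈ l, x ≠ '1') :
    (List.foldl maStep (m, c) l).1 ≤ max m (c + l.length - 1) := by
  induction l generalizing m c with
  | nil => simp at h
  | cons x t ih =>
    simp only [List.foldl_cons, maStep, List.length_cons]
    split_ifs with hx
    · obtain ⟨y, hy, hy1⟩ := h
      rcases List.mem_cons.mp hy with rfl | hyt
      · exact absurd hx hy1
      · have := ih (max m (c + 1)) (c + 1) (by omega) ⟨y, hyt, hy1⟩
        have ht : 0 < t.length := List.length_pos_of_mem hyt
        push_cast
        push_cast at this
        omega
    · by_cases ht : ∃ y ∈ t, y ≠ '1'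
      · have := ih m 0 le_rfl ht
        push_cast; push_cast at this; omega
      · have := (maFold_le t m 0 le_rfl).1
        push_cast; push_cast at this; omega

-- a non-'1' somewhere: trailing run + leading run fit strictly inside l
lemma maFold_snd_add_prefix (l : List Char) (m c : Int)
    (h : ∃ x ∈ l, x ≠ '1') :
    (List.foldl maStep (m, c) l).2 + mbPrefix l ≤ l.length - 1 := by
  induction l generalizing m c with
  | nil => simp at h
  | cons x t ih =>
    simp only [List.foldl_cons, maStep, mbPrefix, List.length_cons]
    split_ifs with hx
    · obtain ⟨y, hy, hy1⟩ := h
      rcases List.mem_cons.mp hy with rfl | hyt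
      · exact absurd hx hy1
      · have := ih (max m (c + 1)) (c + 1) ⟨y, hyt, hy1⟩
        push_cast; push_cast at this; omega
    · have := (maFold_le t m 0 le_rfl).2
      push_cast; push_cast at this; omega

-- B's fold carries A's (best, cur) pair plus a zero-seen flag
lemma mbFold_eq (l : List Char) (b c : Int) (z : Bool) :
    List.foldl mbStep (b, c, z) l =
      ((List.foldl maStep (b, c) l).1, (List.foldl maStep (b, c) l).2,
        (z || l.any (fun x => !(x == '1')))) := by
  induction l generalizing b c z with
  | nil => simp
  | cons x t ih =>
    simp only [List.foldl_cons, mbStep, maStep, List.any_cons]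
    split_ifs with hx hgt
    · rw [ih]
      have hmx : max b (c + 1) = c + 1 := by omega
      rw [hmx]
      simp [hx]
    · rw [ih]
      have hmx : max b (c + 1) = b := by omega
      rw [hmx]
      simp [hx]
    · rw [ih]
      simp [hx]

-- ===== VERDICT (by name: the statement is the Claim_ definition above) =====
theorem max_area_of_ones_spec : Claim_equal_max_area_of_ones := by
  intro s _
  show max_area_of_ones s = max_area_of_ones_alt s
  unfold max_area_of_ones max_area_of_ones_alt
  simp only [List.foldl_append]
  set l := s.toList with hl
  set n : Int := (l.length : Int) with hn
  have hn0 : 0 ≤ n := by positivity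
  rw [mbFold_eq l 0 0 false]
  dsimp only
  simp only [Bool.false_or]
  set MC := List.foldl maStep (0, 0) l with hMC
  have hB := maFold_bounds l 0 0 le_rfl le_rfl
  rw [← hMC] at hB
  have hMCeta : (MC.1, MC.2) = MC := rfl
  by_cases hz : l.any (fun x => !(x == '1')) = true
  · -- some non-'1' present
    have hex : ∃ x ∈ l, x ≠ '1' := by
      simpa using hz
    have hlen1 : 1 ≤ n := by
      obtain ⟨y, hy, _⟩ := hex
      have : 0 < l.length := List.length_pos_of_mem hy
      omega
    have hfst : (List.foldl maStep MC l).1 =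
        max MC.1 (max (MC.2 + mbPrefix l) MC.1) := by
      rw [← hMCeta]
      rw [maFold_fst_eq l MC.1 MC.2 hB.1 hB.2.1, ← hMC]
    have hM1 : MC.1 ≤ n - 1 := by
      have := maFold_fst_lt l 0 0 le_rfl hex
      rw [← hMC] at this
      omega
    have hCP : MC.2 + mbPrefix l ≤ n - 1 := by
      have := maFold_snd_add_prefix l 0 0 hex
      rw [← hMC] at this
      omega
    have hp := mbPrefix_bounds l
    have hm : max MC.1 (max (MC.2 + mbPrefix l) MC.1) = max MC.1 (mbPrefix l + MC.2) := by
      omega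
    have hne : ¬((l.any fun x => !(x == '1')) = false) := by
      intro h; rw [h] at hz; exact Bool.noConfusion hz
    rw [if_neg hne, hfst, hm]
    split_ifs <;> first | rfl | omega
  · -- all ones (or empty)
    have hall : ∀ x ∈ l, x = '1' := by
      intro x hx
      by_contra hne
      exact hz (by simpa using ⟨x, hx, hne⟩)
    have hz' : l.any (fun x => !(x == '1')) = false := by
      simpa using hz
    have hMCval : MC = (n, n) := by
      rw [hMC, maFold_all_ones l hall 0 0 le_rfl le_rfl, Prod.mk.injEq]
      constructor <;> omega
    have hfst : (List.foldl maStep MC l).1 = 2 * n := by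
      rw [hMCval, maFold_all_ones l hall n n hn0 le_rfl]
      show max n (n + (l.length : Int)) = 2 * n
      omega
    rw [if_pos hz', hfst]
    by_cases h0 : n = 0
    · rw [h0]; norm_num
    · rw [if_neg (by omega), if_pos (by omega)]
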